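-- pv_equiv track=rewrite | github.com/issdn/school-exercises | line_counter/github_counter.py | clear_dict
-- ===== SOURCE A (Python) =====
-- def clear_dict(files) -> None:
--     """
--     {
--         'Bibliothek': {
--             'files': {
--                 'java': 0,
--                 'js': 5,
--                 'ts': 0,
--                 'py': 34,
--                 'ps1': 1,
--                 'html': 2,
--                 'css': 1,
--                 'tsx': 0,
--             }
--         ...
--         }
--     ...
--     }
--
--     IS CLEARED TO
--
--     {
--     'Bibliothek': {
--         'files': {
--             'css': 1,
--             'html': 2,
--             'js': 5,
--             'ps1': 1,
--             'py': 34
--             }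
--         ...
--         }
--     ...
--     }
--
--     """
--     to_remove = {}
--     for repo, data in files.items():
--         for data_type, data_by_extension in data.items():
--             for extension, number in data_by_extension.items():
--                 if number == 0:
--                     if repo in to_remove:
--                         if data_type in to_remove[repo]:
--                             to_remove[repo][data_type].append(extension)
--                         else:
--                             to_remove[repo][data_type] = [extension]
--                     else:
--                         to_remove[repo] = {data_type: [extension]}
--     for r, to_remove_data_types in to_remove.items():
--         for data_type, extension_list in to_remove_data_types.items():
--             for item in extension_list:
--                 del files[r][data_type][item]
--     return files
-- ===== SOURCE B (Python) =====
-- def clear_dict(files) -> None: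
--     # Rebuild instead of delete: construct a fresh nested dict keeping only the
--     # non-zero extension entries (nested comprehensions). No to_remove index,
--     # no deletion pass, and — unlike A — no in-place mutation of `files`;
--     # the RETURN VALUE is identical to A's.
--     return {
--         repo: {
--             data_type: {ext: n for ext, n in by_ext.items() if n != 0}
--             for data_type, by_ext in data.items()
--         }
--         for repo, data in files.items()
--     }
-- ===== Notes on version B (the rewrite author's own statement) =====
-- stated objective: simpler
-- what changed: B replaces A's collect-zero-keys index plus second in-place deletion sweep by a pure rebuild: nested comprehensions that keep the non-zero entries (no deletion, no mutation of the argument; return value only).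
import Mathlib
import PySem

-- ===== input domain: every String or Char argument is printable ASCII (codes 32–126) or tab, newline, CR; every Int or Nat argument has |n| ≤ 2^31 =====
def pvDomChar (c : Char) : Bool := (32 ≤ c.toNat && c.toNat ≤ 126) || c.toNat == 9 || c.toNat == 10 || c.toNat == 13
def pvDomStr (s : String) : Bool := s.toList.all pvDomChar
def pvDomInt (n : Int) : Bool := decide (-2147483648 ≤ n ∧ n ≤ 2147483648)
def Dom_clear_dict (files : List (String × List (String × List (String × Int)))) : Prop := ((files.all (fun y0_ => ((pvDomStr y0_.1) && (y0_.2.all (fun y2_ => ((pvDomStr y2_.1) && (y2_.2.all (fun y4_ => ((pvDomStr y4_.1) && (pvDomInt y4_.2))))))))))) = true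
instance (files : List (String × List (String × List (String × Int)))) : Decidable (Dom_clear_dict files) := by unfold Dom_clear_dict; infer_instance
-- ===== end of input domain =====

-- B rebuilds the nested structure, keeping non-zero entries (nested comprehensions), instead of A's
-- collect-and-delete; simpler, not faster. A mutates its argument in place, B does not: the
-- equivalence proved here is about the RETURN value only.


-- Dict primitives on association lists used by the PORT OF A (first-match semantics):
-- pvLookup = `k in d` / `d[k]`, pvUpdAt = in-place mutation of the object stored at key k, pvDel = `del d[k]`.
def pvLookup {α : Type} (d : List (String × α)) (k : String) : Option α :=
  match d with
  | [] => none
  | (k', v) :: rest => if k' = k then some v else pvLookup rest k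

def pvUpdAt {α : Type} (d : List (String × α)) (k : String) (f : α → α) : List (String × α) :=
  match d with
  | [] => []
  | (k', v) :: rest => if k' = k then (k', f v) :: rest else (k', v) :: pvUpdAt rest k f

def pvDel (d : List (String × Int)) (k : String) : List (String × Int) :=
  match d with
  | [] => []
  | (k', v) :: rest => if k' = k then rest else (k', v) :: pvDel rest k

-- ===== PORT A =====
-- the body of A's innermost `if number == 0:` branch (the nested membership-test chain on to_remove)
def trAdd (tr : List (String × List (String × List String))) (repo dt ext : String) :
    List (String × List (String × List String)) :=
  match pvLookup tr repo with
  | some inner =>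
    match pvLookup inner dt with
    | some _ => pvUpdAt tr repo (fun inner => pvUpdAt inner dt (fun l => l ++ [ext]))   -- to_remove[repo][dt].append(ext)
    | none   => pvUpdAt tr repo (fun inner => inner ++ [(dt, [ext])])                    -- to_remove[repo][dt] = [ext]
  | none => tr ++ [(repo, [(dt, [ext])])]                                                -- to_remove[repo] = {dt: [ext]}

-- first loop nest of A: build to_remove
def clear_dict_build (files : List (String × List (String × List (String × Int)))) :
    List (String × List (String × List String)) :=
  files.foldl (fun tr rd =>
    rd.2.foldl (fun tr dl =>
      dl.2.foldl (fun tr en =>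
        if en.2 == 0 then trAdd tr rd.1 dl.1 en.1 else tr) tr) tr) []

-- second loop nest of A: del files[r][data_type][item]
def clear_dict (files : List (String × List (String × List (String × Int)))) :
    List (String × List (String × List (String × Int))) :=
  (clear_dict_build files).foldl (fun fs rts =>
    rts.2.foldl (fun fs dte =>
      dte.2.foldl (fun fs item =>
        pvUpdAt fs rts.1 (fun data => pvUpdAt data dte.1 (fun leaf => pvDel leaf item))) fs) fs) files

-- ===== PORT B =====
-- nested comprehensions: {repo: {dt: {ext: n for ext, n in by_ext.items() if n != 0} ...} ...}
def clear_dict_alt (files : List (String × List (String × List (String × Int)))) :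
    List (String × List (String × List (String × Int))) :=
  files.map (fun rd =>
    (rd.1, rd.2.map (fun dl =>
      (dl.1, dl.2.filter (fun p => !(p.2 == 0))))))

-- ===== PRECONDITION & SPEC =====
-- Pre_ excludes association lists with duplicate keys at any of the three levels: those do not
-- represent a Python dict (A's parameter is a dict of dicts of dicts), so A's behaviour is not defined on them.
def Pre_clear_dict (files : List (String × List (String × List (String × Int)))) : Prop :=
  (files.map (·.1)).Nodup ∧
    ∀ rd ∈ files, (rd.2.map (·.1)).Nodup ∧ ∀ dl ∈ rd.2, (dl.2.map (·.1)).Nodup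
instance (files : List (String × List (String × List (String × Int)))) : Decidable (Pre_clear_dict files) := by
  unfold Pre_clear_dict; infer_instance

def pvWitness_clear_dict : (List (String × List (String × List (String × Int)))) :=
  [("Bibliothek", [("files", [("py", 34), ("ts", 0), ("js", 5)])])]

def Spec_clear_dict (files : List (String × List (String × List (String × Int)))) (out : List (String × List (String × List (String × Int)))) : Prop := out = clear_dict_alt files
instance (files : List (String × List (String × List (String × Int)))) (out : List (String × List (String × List (String × Int)))) : Decidable (Spec_clear_dict files out) := by unfold Spec_clear_dict; infer_instance

-- ===== CLAIM (what is proved, stated in full; the proofs are below) =====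
def Claim_equal_clear_dict : Prop := ∀ (files : List (String × List (String × List (String × Int)))), Dom_clear_dict files → Pre_clear_dict files → Spec_clear_dict files (clear_dict files)

-- ===== LEMMAS AND PROOFS =====

theorem pvUpdAt_pvUpdAt {α : Type} (d : List (String × α)) (k : String) (f g : α → α) :
    pvUpdAt (pvUpdAt d k f) k g = pvUpdAt d k (fun v => g (f v)) := by
  induction d with
  | nil => rfl
  | cons p rest ih =>
    obtain ⟨k', v⟩ := p
    by_cases h : k' = k <;> simp [pvUpdAt, h, ih]

theorem pvUpdAt_id {α : Type} (d : List (String × α)) (k : String) :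
    pvUpdAt d k (fun v => v) = d := by
  induction d with
  | nil => rfl
  | cons p rest ih =>
    obtain ⟨k', v⟩ := p
    by_cases h : k' = k <;> simp [pvUpdAt, h, ih]

theorem pvLookup_pvUpdAt_self {α : Type} (d : List (String × α)) (k : String) (f : α → α) :
    pvLookup (pvUpdAt d k f) k = (pvLookup d k).map f := by
  induction d with
  | nil => rfl
  | cons p rest ih =>
    obtain ⟨k', v⟩ := p
    by_cases h : k' = k <;> simp [pvUpdAt, pvLookup, h, ih]

theorem pvUpdAt_congr {α : Type} (d : List (String × α)) (k : String) (v : α) (f g : α → α)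
    (h : pvLookup d k = some v) (hfg : f v = g v) :
    pvUpdAt d k f = pvUpdAt d k g := by
  induction d with
  | nil => rfl
  | cons p rest ih =>
    obtain ⟨k', w⟩ := p
    by_cases hk : k' = k
    · simp [pvLookup, hk] at h
      simp [pvUpdAt, hk, h, hfg]
    · simp [pvLookup, hk] at h
      simp [pvUpdAt, hk, ih h]

theorem pvUpdAt_cons_ne {α : Type} (d : List (String × α)) (k k' : String) (v : α) (f : α → α)
    (hne : k' ≠ k) : pvUpdAt ((k', v) :: d) k f = (k', v) :: pvUpdAt d k f := by
  simp [pvUpdAt, hne]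

theorem pvUpdAt_append_of_none {α : Type} (d : List (String × α)) (k : String) (v : α) (f : α → α)
    (h : pvLookup d k = none) :
    pvUpdAt (d ++ [(k, v)]) k f = d ++ [(k, f v)] := by
  induction d with
  | nil => simp [pvUpdAt]
  | cons p rest ih =>
    obtain ⟨k', w⟩ := p
    by_cases hk : k' = k
    · simp [pvLookup, hk] at h
    · simp [pvLookup, hk] at h
      simp [pvUpdAt, hk, ih h]

theorem pvLookup_append_of_none {α : Type} (d : List (String × α)) (k : String) (v : α)
    (h : pvLookup d k = none) :
    pvLookup (d ++ [(k, v)]) k = some v := by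
  induction d with
  | nil => simp [pvLookup]
  | cons p rest ih =>
    obtain ⟨k', w⟩ := p
    by_cases hk : k' = k
    · simp [pvLookup, hk] at h
    · simp [pvLookup, hk] at h ⊢
      exact ih h

theorem pvLookup_append_of_ne {α : Type} (d : List (String × α)) (k k' : String) (v : α)
    (h : pvLookup d k' = none) (hne : k' ≠ k) :
    pvLookup (d ++ [(k, v)]) k' = none := by
  induction d with
  | nil => simp [pvLookup, hne.symm]
  | cons p rest ih =>
    obtain ⟨k'', w⟩ := p
    by_cases hk : k'' = k'
    · simp [pvLookup, hk] at h
    · simp [pvLookup, hk] at h ⊢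
      exact ih h

-- zeros of a leaf: the extension list A accumulates in to_remove[r][dt]
def zeros (leaf : List (String × Int)) : List String :=
  (leaf.filter (fun p => p.2 == 0)).map (·.1)

theorem zeros_cons (e : String × Int) (rest : List (String × Int)) :
    zeros (e :: rest) = if e.2 == 0 then e.1 :: zeros rest else zeros rest := by
  by_cases h : e.2 == 0 <;> simp [zeros, h]

-- the ext loop, with repo and dt both already present in tr
theorem extloop_present_present (repo dt : String) :
    ∀ (leaf : List (String × Int)) (tr : List (String × List (String × List String)))
      (inner : List (String × List String)) (l : List String),
      pvLookup tr repo = some inner → pvLookup inner dt = some l →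
      leaf.foldl (fun tr en => if en.2 == 0 then trAdd tr repo dt en.1 else tr) tr
        = pvUpdAt tr repo (fun inner => pvUpdAt inner dt (fun l => l ++ zeros leaf)) := by
  intro leaf
  induction leaf with
  | nil =>
    intro tr inner l _ _
    simp [zeros, pvUpdAt_id]
  | cons e rest ih =>
    intro tr inner l hr hd
    by_cases hz : e.2 == 0
    · have hstep : trAdd tr repo dt e.1
          = pvUpdAt tr repo (fun inner => pvUpdAt inner dt (fun l => l ++ [e.1])) := by
        simp [trAdd, hr, hd]
      have hr' : pvLookup (pvUpdAt tr repo (fun inner => pvUpdAt inner dt (fun l => l ++ [e.1]))) repo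
          = some (pvUpdAt inner dt (fun l => l ++ [e.1])) := by
        simp [pvLookup_pvUpdAt_self, hr]
      have hd' : pvLookup (pvUpdAt inner dt (fun l => l ++ [e.1])) dt = some (l ++ [e.1]) := by
        simp [pvLookup_pvUpdAt_self, hd]
      simp only [List.foldl_cons, hz, if_true]
      rw [hstep, ih _ _ _ hr' hd', pvUpdAt_pvUpdAt]
      congr 1
      funext inner'
      rw [pvUpdAt_pvUpdAt]
      simp [zeros_cons, hz]
    · simp only [List.foldl_cons, hz, if_false, Bool.false_eq_true]
      rw [ih _ _ _ hr hd]
      simp [zeros_cons, hz]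

-- the ext loop, with repo present but dt absent
theorem extloop_present_absent (repo dt : String) :
    ∀ (leaf : List (String × Int)) (tr : List (String × List (String × List String)))
      (inner : List (String × List String)),
      pvLookup tr repo = some inner → pvLookup inner dt = none →
      leaf.foldl (fun tr en => if en.2 == 0 then trAdd tr repo dt en.1 else tr) tr
        = if zeros leaf = [] then tr
          else pvUpdAt tr repo (fun inner => inner ++ [(dt, zeros leaf)]) := by
  intro leaf
  induction leaf with
  | nil => intro tr inner _ _; simp [zeros]
  | cons e rest ih =>
    intro tr inner hr hd
    by_cases hz : e.2 == 0
    · have hstep : trAdd tr repo dt e.1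
          = pvUpdAt tr repo (fun inner => inner ++ [(dt, [e.1])]) := by
        simp [trAdd, hr, hd]
      have hr' : pvLookup (pvUpdAt tr repo (fun inner => inner ++ [(dt, [e.1])])) repo
          = some (inner ++ [(dt, [e.1])]) := by
        simp [pvLookup_pvUpdAt_self, hr]
      have hd' : pvLookup (inner ++ [(dt, [e.1])]) dt = some [e.1] :=
        pvLookup_append_of_none _ _ _ hd
      simp only [List.foldl_cons, hz, if_true]
      rw [hstep, extloop_present_present repo dt rest _ _ _ hr' hd', pvUpdAt_pvUpdAt]
      have : zeros (e :: rest) = e.1 :: zeros rest := by simp [zeros_cons, hz]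
      rw [this, if_neg (List.cons_ne_nil _ _)]
      exact pvUpdAt_congr _ _ _ _ _ hr (pvUpdAt_append_of_none _ _ _ _ hd)
    · simp only [List.foldl_cons, hz, if_false, Bool.false_eq_true]
      rw [ih _ _ hr hd, zeros_cons]
      simp [hz]

-- the ext loop, with repo absent
theorem extloop_absent (repo dt : String) :
    ∀ (leaf : List (String × Int)) (tr : List (String × List (String × List String))),
      pvLookup tr repo = none →
      leaf.foldl (fun tr en => if en.2 == 0 then trAdd tr repo dt en.1 else tr) tr
        = if zeros leaf = [] then tr else tr ++ [(repo, [(dt, zeros leaf)])] := by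
  intro leaf
  induction leaf with
  | nil => intro tr _; simp [zeros]
  | cons e rest ih =>
    intro tr hr
    by_cases hz : e.2 == 0
    · have hstep : trAdd tr repo dt e.1 = tr ++ [(repo, [(dt, [e.1])])] := by
        simp [trAdd, hr]
      have hr' : pvLookup (tr ++ [(repo, [(dt, [e.1])])]) repo = some [(dt, [e.1])] :=
        pvLookup_append_of_none _ _ _ hr
      have hd' : pvLookup ([(dt, [e.1])] : List (String × List String)) dt = some [e.1] := by
        simp [pvLookup]
      simp only [List.foldl_cons, hz, if_true]
      rw [hstep, extloop_present_present repo dt rest _ _ _ hr' hd',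
          pvUpdAt_append_of_none _ _ _ _ hr]
      have : zeros (e :: rest) = e.1 :: zeros rest := by simp [zeros_cons, hz]
      rw [this, if_neg (List.cons_ne_nil _ _)]
      congr 3
      simp [pvUpdAt]
    · simp only [List.foldl_cons, hz, if_false, Bool.false_eq_true]
      rw [ih _ hr, zeros_cons]
      simp [hz]

-- spec of to_remove[repo]: the (dt, zero-ext list) pairs, empty ones dropped
def specData (data : List (String × List (String × Int))) : List (String × List String) :=
  (data.map (fun dl => (dl.1, zeros dl.2))).filter (fun p => !p.2.isEmpty)

-- spec of to_remove
def spec (files : List (String × List (String × List (String × Int)))) :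
    List (String × List (String × List String)) :=
  (files.map (fun rd => (rd.1, specData rd.2))).filter (fun p => !p.2.isEmpty)

theorem dtloop_present (repo : String) :
    ∀ (data : List (String × List (String × Int)))
      (tr0 : List (String × List (String × List String))) (inner : List (String × List String)),
      pvLookup tr0 repo = none → (data.map (·.1)).Nodup →
      (∀ dl ∈ data, pvLookup inner dl.1 = none) →
      data.foldl (fun tr dl =>
          dl.2.foldl (fun tr en => if en.2 == 0 then trAdd tr repo dl.1 en.1 else tr) tr)
        (tr0 ++ [(repo, inner)])
        = tr0 ++ [(repo, inner ++ specData data)] := by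
  intro data
  induction data with
  | nil => intro tr0 inner _ _ _; simp [specData]
  | cons dl rest ih =>
    intro tr0 inner h0 hnd hdis
    have hr : pvLookup (tr0 ++ [(repo, inner)]) repo = some inner :=
      pvLookup_append_of_none _ _ _ h0
    have hd : pvLookup inner dl.1 = none := hdis dl (by simp)
    have hspec : specData (dl :: rest)
        = if zeros dl.2 = [] then specData rest else (dl.1, zeros dl.2) :: specData rest := by
      by_cases hz : zeros dl.2 = [] <;> simp [specData, hz]
    simp only [List.foldl_cons]
    rw [extloop_present_absent repo dl.1 dl.2 _ _ hr hd]
    by_cases hz : zeros dl.2 = []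
    · rw [if_pos hz, hspec, if_pos hz]
      exact ih tr0 inner h0 (by simp at hnd; exact hnd.2) (fun d hd' => hdis d (by simp [hd']))
    · rw [if_neg hz, pvUpdAt_append_of_none _ _ _ _ h0]
      have hnd' : (rest.map (·.1)).Nodup := by simp at hnd; exact hnd.2
      have hdis' : ∀ d ∈ rest, pvLookup (inner ++ [(dl.1, zeros dl.2)]) d.1 = none := by
        intro d hdm
        have hne : d.1 ≠ dl.1 := by
          have h1 : dl.1 ∉ rest.map (·.1) := (List.nodup_cons.mp (by simpa using hnd)).1
          exact fun heq => h1 (by rw [← heq]; exact List.mem_map_of_mem hdm)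
        exact pvLookup_append_of_ne _ _ _ _ (hdis d (by simp [hdm])) hne
      rw [ih tr0 (inner ++ [(dl.1, zeros dl.2)]) h0 hnd' hdis', hspec, if_neg hz]
      simp

theorem dtloop_absent (repo : String) :
    ∀ (data : List (String × List (String × Int)))
      (tr0 : List (String × List (String × List String))),
      pvLookup tr0 repo = none → (data.map (·.1)).Nodup →
      data.foldl (fun tr dl =>
          dl.2.foldl (fun tr en => if en.2 == 0 then trAdd tr repo dl.1 en.1 else tr) tr) tr0
        = if specData data = [] then tr0 else tr0 ++ [(repo, specData data)] := by
  intro data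
  induction data with
  | nil => intro tr0 _ _; simp [specData]
  | cons dl rest ih =>
    intro tr0 h0 hnd
    have hspec : specData (dl :: rest)
        = if zeros dl.2 = [] then specData rest else (dl.1, zeros dl.2) :: specData rest := by
      by_cases hz : zeros dl.2 = [] <;> simp [specData, hz]
    simp only [List.foldl_cons]
    rw [extloop_absent repo dl.1 dl.2 _ h0]
    by_cases hz : zeros dl.2 = []
    · rw [if_pos hz, hspec, if_pos hz]
      exact ih tr0 h0 (by simp at hnd; exact hnd.2)
    · rw [if_neg hz]
      have hdis : ∀ d ∈ rest, pvLookup ([(dl.1, zeros dl.2)] : List (String × List String)) d.1 = none := by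
        intro d hdm
        have hne : d.1 ≠ dl.1 := by
          have h1 : dl.1 ∉ rest.map (·.1) := (List.nodup_cons.mp (by simpa using hnd)).1
          exact fun heq => h1 (by rw [← heq]; exact List.mem_map_of_mem hdm)
        simp [pvLookup, hne.symm]
      have := dtloop_present repo rest tr0 [(dl.1, zeros dl.2)] h0
        (by simp at hnd; exact hnd.2) hdis
      rw [show tr0 ++ [(repo, [(dl.1, zeros dl.2)])]
            = tr0 ++ [(repo, ([(dl.1, zeros dl.2)] : List (String × List String)))] from rfl, this,
          hspec, if_neg hz]
      simp

theorem build_eq_spec :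
    ∀ (files : List (String × List (String × List (String × Int))))
      (tr0 : List (String × List (String × List String))),
      (files.map (·.1)).Nodup →
      (∀ rd ∈ files, pvLookup tr0 rd.1 = none ∧ (rd.2.map (·.1)).Nodup) →
      files.foldl (fun tr rd =>
          rd.2.foldl (fun tr dl =>
            dl.2.foldl (fun tr en => if en.2 == 0 then trAdd tr rd.1 dl.1 en.1 else tr) tr) tr) tr0
        = tr0 ++ spec files := by
  intro files
  induction files with
  | nil => intro tr0 _ _; simp [spec]
  | cons rd rest ih =>
    intro tr0 hnd h
    have h0 : pvLookup tr0 rd.1 = none := (h rd (by simp)).1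
    have hndd : (rd.2.map (·.1)).Nodup := (h rd (by simp)).2
    have hspec : spec (rd :: rest)
        = if specData rd.2 = [] then spec rest else (rd.1, specData rd.2) :: spec rest := by
      by_cases hz : specData rd.2 = [] <;> simp [spec, hz]
    simp only [List.foldl_cons]
    rw [dtloop_absent rd.1 rd.2 tr0 h0 hndd]
    have hnd' : (rest.map (·.1)).Nodup := by simp at hnd; exact hnd.2
    by_cases hz : specData rd.2 = []
    · rw [if_pos hz, hspec, if_pos hz]
      exact ih tr0 hnd' (fun d hdm => (h d (by simp [hdm])))
    · rw [if_neg hz, hspec, if_neg hz]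
      have h' : ∀ d ∈ rest, pvLookup (tr0 ++ [(rd.1, specData rd.2)]) d.1 = none
          ∧ (d.2.map (·.1)).Nodup := by
        intro d hdm
        refine ⟨?_, (h d (by simp [hdm])).2⟩
        have hne : d.1 ≠ rd.1 := by
          have h1 : rd.1 ∉ rest.map (·.1) := (List.nodup_cons.mp (by simpa using hnd)).1
          exact fun heq => h1 (by rw [← heq]; exact List.mem_map_of_mem hdm)
        exact pvLookup_append_of_ne _ _ _ _ (h d (by simp [hdm])).1 hne
      rw [ih (tr0 ++ [(rd.1, specData rd.2)]) hnd' h']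
      simp

-- a fold of pvUpdAt's at the SAME key fuses into one pvUpdAt
theorem foldl_pvUpdAt_fuse {α β : Type} (l : List β) (k : String) (g : β → α → α) :
    ∀ (x : List (String × α)),
      l.foldl (fun x e => pvUpdAt x k (g e)) x
        = pvUpdAt x k (fun v => l.foldl (fun v e => g e v) v) := by
  induction l with
  | nil => intro x; simp [pvUpdAt_id]
  | cons e rest ih =>
    intro x
    simp only [List.foldl_cons]
    rw [ih, pvUpdAt_pvUpdAt]

-- a fold of pvUpdAt's at keys all different from the head's key passes over the head
theorem foldl_pvUpdAt_cons_ne {α β : Type} (tr : List β) (key : β → String) (F : β → α → α)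
    (k : String) (v : α) :
    ∀ (fs : List (String × α)), (∀ p ∈ tr, key p ≠ k) →
      tr.foldl (fun fs e => pvUpdAt fs (key e) (F e)) ((k, v) :: fs)
        = (k, v) :: tr.foldl (fun fs e => pvUpdAt fs (key e) (F e)) fs := by
  induction tr with
  | nil => intro fs _; rfl
  | cons e rest ih =>
    intro fs h
    have hne : key e ≠ k := h e (by simp)
    simp only [List.foldl_cons]
    rw [pvUpdAt_cons_ne _ _ _ _ _ (fun hx => hne hx.symm)]
    exact ih _ (fun p hp => h p (by simp [hp]))

-- the dt-level deletion fold applied to one repo's data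
def applyData (dts : List (String × List String)) (data : List (String × List (String × Int))) :
    List (String × List (String × Int)) :=
  dts.foldl (fun data dte => pvUpdAt data dte.1 (fun leaf => dte.2.foldl (fun d e => pvDel d e) leaf)) data

theorem keys_specData (data : List (String × List (String × Int))) :
    ∀ p ∈ specData data, p.1 ∈ data.map (·.1) := by
  intro p hp
  simp only [specData, List.mem_filter, List.mem_map] at hp
  obtain ⟨⟨q, hq, rfl⟩, -⟩ := hp
  simpa using List.mem_map_of_mem (f := (·.1)) hq

theorem keys_spec (files : List (String × List (String × List (String × Int)))) :
    ∀ p ∈ spec files, p.1 ∈ files.map (·.1) := by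
  intro p hp
  simp only [spec, List.mem_filter, List.mem_map] at hp
  obtain ⟨⟨q, hq, rfl⟩, -⟩ := hp
  simpa using List.mem_map_of_mem (f := (·.1)) hq

theorem zeros_of_specData_nil (data : List (String × List (String × Int)))
    (h : specData data = []) : ∀ dl ∈ data, zeros dl.2 = [] := by
  intro dl hdl
  by_contra hz
  have : (dl.1, zeros dl.2) ∈ specData data := by
    simp only [specData, List.mem_filter, List.mem_map]
    exact ⟨⟨dl, hdl, rfl⟩, by simpa using hz⟩
  simp [h] at this

theorem applyData_spec :
    ∀ (data : List (String × List (String × Int))), (data.map (·.1)).Nodup →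
      applyData (specData data) data
        = data.map (fun dl => (dl.1, (zeros dl.2).foldl (fun d e => pvDel d e) dl.2)) := by
  intro data
  induction data with
  | nil => intro _; rfl
  | cons dl rest ih =>
    intro hnd
    have h1 : dl.1 ∉ rest.map (·.1) := (List.nodup_cons.mp (by simpa using hnd)).1
    have hnd' : (rest.map (·.1)).Nodup := (List.nodup_cons.mp (by simpa using hnd)).2
    have hkeys : ∀ p ∈ specData rest, p.1 ≠ dl.1 := by
      intro p hp heq
      exact h1 (heq ▸ keys_specData rest p hp)
    have hspec : specData (dl :: rest)
        = if zeros dl.2 = [] then specData rest else (dl.1, zeros dl.2) :: specData rest := by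
      by_cases hz : zeros dl.2 = [] <;> simp [specData, hz]
    by_cases hz : zeros dl.2 = []
    · obtain ⟨k, leaf⟩ := dl
      simp only at hz
      rw [hspec, if_pos hz]
      unfold applyData
      rw [foldl_pvUpdAt_cons_ne (specData rest) (·.1) _ k leaf rest hkeys]
      simp only [List.map_cons, hz, List.foldl_nil]
      rw [← applyData, ih hnd']
    · obtain ⟨k, leaf⟩ := dl
      simp only at hz
      rw [hspec, if_neg hz]
      unfold applyData
      simp only [List.foldl_cons]
      rw [show pvUpdAt ((k, leaf) :: rest) k (fun l => (zeros leaf).foldl (fun d e => pvDel d e) l)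
            = (k, (zeros leaf).foldl (fun d e => pvDel d e) leaf) :: rest from by simp [pvUpdAt]]
      rw [foldl_pvUpdAt_cons_ne (specData rest) (·.1) _ k _ rest hkeys]
      rw [← applyData, ih hnd']
      simp

theorem sweep_spec :
    ∀ (files : List (String × List (String × List (String × Int)))),
      (files.map (·.1)).Nodup →
      (∀ rd ∈ files, (rd.2.map (·.1)).Nodup) →
      (spec files).foldl (fun fs rts => pvUpdAt fs rts.1 (applyData rts.2)) files
        = files.map (fun rd => (rd.1, rd.2.map (fun dl =>
            (dl.1, (zeros dl.2).foldl (fun d e => pvDel d e) dl.2)))) := by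
  intro files
  induction files with
  | nil => intro _ _; rfl
  | cons rd rest ih =>
    intro hnd h
    have h1 : rd.1 ∉ rest.map (·.1) := (List.nodup_cons.mp (by simpa using hnd)).1
    have hnd' : (rest.map (·.1)).Nodup := (List.nodup_cons.mp (by simpa using hnd)).2
    have hkeys : ∀ p ∈ spec rest, p.1 ≠ rd.1 := by
      intro p hp heq
      exact h1 (heq ▸ keys_spec rest p hp)
    have hspec : spec (rd :: rest)
        = if specData rd.2 = [] then spec rest else (rd.1, specData rd.2) :: spec rest := by
      by_cases hz : specData rd.2 = [] <;> simp [spec, hz]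
    have ih' := ih hnd' (fun d hd => h d (by simp [hd]))
    by_cases hz : specData rd.2 = []
    · obtain ⟨r, data⟩ := rd
      simp only at hz
      rw [hspec, if_pos hz]
      rw [foldl_pvUpdAt_cons_ne (spec rest) (·.1) _ r data rest hkeys, ih']
      have hall := zeros_of_specData_nil data hz
      have hmap : data.map (fun dl => (dl.1, (zeros dl.2).foldl (fun d e => pvDel d e) dl.2))
          = data := by
        have h2 : data.map (fun dl => (dl.1, (zeros dl.2).foldl (fun d e => pvDel d e) dl.2))
            = data.map (fun dl => (dl.1, dl.2)) :=
          List.map_congr_left (fun dl hdl => by rw [hall dl hdl]; rfl)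
        simp [h2]
      simp only [List.map_cons, hmap]
    · obtain ⟨r, data⟩ := rd
      simp only at hz
      rw [hspec, if_neg hz]
      simp only [List.foldl_cons]
      rw [show pvUpdAt ((r, data) :: rest) r (applyData (specData data))
            = (r, applyData (specData data) data) :: rest from by simp [pvUpdAt]]
      rw [foldl_pvUpdAt_cons_ne (spec rest) (·.1) _ r _ rest hkeys, ih',
          applyData_spec data (h (r, data) (by simp))]
      simp

theorem foldl_fun_congr {α β : Type} (l : List β) (f g : α → β → α) (x : α)
    (h : ∀ a b, f a b = g a b) : l.foldl f x = l.foldl g x := by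
  have : f = g := funext fun a => funext fun b => h a b
  rw [this]

-- A's raw second loop nest, fused into one pvUpdAt per to_remove entry
theorem rawsweep_eq (tr : List (String × List (String × List String)))
    (fs : List (String × List (String × List (String × Int)))) :
    tr.foldl (fun fs rts =>
        rts.2.foldl (fun fs dte =>
          dte.2.foldl (fun fs item =>
            pvUpdAt fs rts.1 (fun data => pvUpdAt data dte.1 (fun leaf => pvDel leaf item))) fs) fs) fs
      = tr.foldl (fun fs rts => pvUpdAt fs rts.1 (applyData rts.2)) fs := by
  apply foldl_fun_congr
  intro fs rts
  have hstep : ∀ (fs : List (String × List (String × List (String × Int)))) (dte : String × List String),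
      dte.2.foldl (fun fs item =>
        pvUpdAt fs rts.1 (fun data => pvUpdAt data dte.1 (fun leaf => pvDel leaf item))) fs
        = pvUpdAt fs rts.1 (fun data =>
            pvUpdAt data dte.1 (fun leaf => dte.2.foldl (fun d e => pvDel d e) leaf)) := by
    intro fs dte
    rw [foldl_pvUpdAt_fuse dte.2 rts.1
        (fun item data => pvUpdAt data dte.1 (fun leaf => pvDel leaf item)) fs]
    congr 1
    funext data
    rw [foldl_pvUpdAt_fuse dte.2 dte.1 (fun item leaf => pvDel leaf item) data]
  rw [foldl_fun_congr rts.2 _ _ fs hstep,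
      foldl_pvUpdAt_fuse rts.2 rts.1
        (fun dte data => pvUpdAt data dte.1 (fun leaf => dte.2.foldl (fun d e => pvDel d e) leaf)) fs]
  rfl

-- keys in zeros leaf are keys of leaf
theorem zeros_subset_keys (leaf : List (String × Int)) :
    ∀ k ∈ zeros leaf, k ∈ leaf.map (·.1) := by
  intro k hk
  simp only [zeros, List.mem_map, List.mem_filter] at hk
  obtain ⟨p, ⟨hp, -⟩, rfl⟩ := hk
  exact List.mem_map_of_mem hp

-- deleting at keys all different from the head passes over the head
theorem foldl_pvDel_ne (ks : List String) (k : String) (v : Int) :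
    ∀ (rest : List (String × Int)), (∀ x ∈ ks, x ≠ k) →
      ks.foldl (fun d e => pvDel d e) ((k, v) :: rest)
        = (k, v) :: ks.foldl (fun d e => pvDel d e) rest := by
  induction ks with
  | nil => intro rest _; rfl
  | cons x xs ih =>
    intro rest h
    have hne : x ≠ k := h x (by simp)
    simp only [List.foldl_cons]
    rw [show pvDel ((k, v) :: rest) x = (k, v) :: pvDel rest x from by
          have : k ≠ x := fun hx => hne hx.symm
          simp [pvDel, this]]
    exact ih _ (fun p hp => h p (by simp [hp]))

-- with distinct keys, deleting all zero keys is filtering the non-zero entries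
theorem del_zeros (leaf : List (String × Int)) (h : (leaf.map (·.1)).Nodup) :
    (zeros leaf).foldl (fun d e => pvDel d e) leaf
      = leaf.filter (fun p => !(p.2 == 0)) := by
  induction leaf with
  | nil => rfl
  | cons e rest ih =>
    have h1 : e.1 ∉ rest.map (·.1) := (List.nodup_cons.mp (by simpa using h)).1
    have hnd' : (rest.map (·.1)).Nodup := (List.nodup_cons.mp (by simpa using h)).2
    have hkeys : ∀ x ∈ zeros rest, x ≠ e.1 := by
      intro x hx heq
      exact h1 (heq ▸ zeros_subset_keys rest x hx)
    obtain ⟨k, n⟩ := e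
    by_cases hz : n == 0
    · rw [zeros_cons]
      simp only [hz, if_true]
      simp only [List.foldl_cons]
      rw [show pvDel ((k, n) :: rest) k = rest from by simp [pvDel]]
      have hfilter : ((k, n) :: rest).filter (fun p => !(p.2 == 0))
          = rest.filter (fun p => !(p.2 == 0)) := by simp [List.filter, hz]
      rw [hfilter]
      exact ih hnd'
    · rw [zeros_cons]
      simp only [hz, if_false, Bool.false_eq_true]
      rw [foldl_pvDel_ne (zeros rest) k n rest hkeys, ih hnd']
      simp [List.filter, hz]

-- ===== VERDICT (by name: the statement is the Claim_ definition above) =====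
theorem clear_dict_spec : Claim_equal_clear_dict := by
  intro files _ hpre
  obtain ⟨hnd, h⟩ := hpre
  unfold Spec_clear_dict clear_dict clear_dict_alt
  have hbuild : clear_dict_build files = spec files := by
    unfold clear_dict_build
    rw [build_eq_spec files [] hnd (fun rd hm => ⟨rfl, (h rd hm).1⟩)]
    simp
  rw [hbuild, rawsweep_eq, sweep_spec files hnd (fun rd hm => (h rd hm).1)]
  apply List.map_congr_left
  intro rd hrd
  congr 1
  apply List.map_congr_left
  intro dl hdl
  congr 1
  exact del_zeros dl.2 ((h rd hrd).2 dl hdl)
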